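-- pv_equiv track=rewrite | github.com/cforan99/testing-py | party.py | most_and_least_common_type
-- ===== SOURCE A (Python) =====
-- def most_and_least_common_type(treats):
--     """Given list of treats, return {most, least} common types.
--
--         Here is a typical case:
--
--         >>> treats = [{'type': 'dessert'}, {'type': 'drink'}, {'type': 'dessert'}]
--         >>> most_and_least_common_type(treats)
--         ('dessert', 'drink')
--
--         Here is the edge case for one type of food:
--
--         >>> one_treat = [{'type': 'entree'}]
--         >>> most_and_least_common_type(one_treat)
--         ('entree', 'entree')
--
--         Here is an edge case when there is a tie for most and/or least:
--
--         >>> treats = [{'type': 'dessert'}, {'type': 'drink'}, {'type': 'dessert'}, {'type': 'drink'}]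
--         >>> most_and_least_common_type(treats)
--         ('dessert', 'dessert')
--
--         >>> treats = [{'type': 'dessert'}, {'type': 'drink'}, {'type': 'dessert'}, {'type': 'drink'}, {'type': 'entree'}]
--         >>> most_and_least_common_type(treats)
--         ('dessert', 'entree')
--
--         >>> treats = [{'type': 'dessert'}, {'type': 'drink'}, {'type': 'dessert'}, {'type': 'drink'}, {'type': 'entree'}, {'type': 'side'}]
--         >>> most_and_least_common_type(treats)
--         ('dessert', 'side')
--
--         Here is an edge case when there is an empty list:
--         >>> empty_list = []
--         >>> most_and_least_common_type(empty_list)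
--         (None, None)
--
--
--     """
--
--     types = {}
--
--     # Count number of each type
--     for treat in treats:
--         types[treat['type']] = types.get(treat['type'], 0) + 1
--
--     most_count = most_type = None
--     least_count = least_type = None
--
--     # Find most, least common
--     for ttype, count in types.items():
--         if most_count is None or count > most_count:
--             most_count = count
--             most_type = ttype
--         if least_count is None or count < least_count:
--             least_count = count
--             least_type = ttype
--
--     return (most_type, least_type)
-- ===== SOURCE B (Python) =====
-- def most_and_least_common_type(treats):
--     kinds = [t['type'] for t in treats]
--     if not kinds:
--         return (None, None)
--     distinct = list(dict.fromkeys(kinds))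
--     top = sorted(distinct, key=kinds.count, reverse=True)
--     ranked = sorted(distinct, key=kinds.count)
--     return (top[0], ranked[0])
-- ===== Notes on version B (the rewrite author's own statement) =====
-- stated objective: alternative
-- what changed: B builds no counting dict and keeps no running extremes: it dedupes the type strings in first-seen order, stably sorts them by list.count (descending for most, ascending for least) and returns the head of each sort, whose stability reproduces A's first-seen tie-break.
import Mathlib
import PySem

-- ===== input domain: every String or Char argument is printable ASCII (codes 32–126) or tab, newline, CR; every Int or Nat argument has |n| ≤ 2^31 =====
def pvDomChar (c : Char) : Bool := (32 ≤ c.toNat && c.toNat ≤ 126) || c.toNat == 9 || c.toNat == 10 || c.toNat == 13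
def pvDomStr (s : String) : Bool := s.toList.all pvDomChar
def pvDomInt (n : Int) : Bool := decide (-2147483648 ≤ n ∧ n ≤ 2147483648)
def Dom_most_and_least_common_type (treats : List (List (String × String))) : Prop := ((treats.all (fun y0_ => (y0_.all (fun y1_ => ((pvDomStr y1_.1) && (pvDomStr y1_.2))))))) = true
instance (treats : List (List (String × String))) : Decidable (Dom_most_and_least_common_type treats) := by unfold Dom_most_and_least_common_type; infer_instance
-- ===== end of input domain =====

-- B drops A's counting dict and running-extremes scan: it dedupes the type strings first-seen and
-- stably sorts them by count (descending / ascending), returning the head of each sort (alternative).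

-- ===== PORT A =====
-- treat['type'], first match in the association list; Pre_ guarantees the key is present, so the
-- default "" is never reached on admitted inputs (Python raises KeyError exactly there).
def pvType (t : List (String × String)) : String := ((PySem.Dict.mk t).get? "type").getD ""

-- 'most_count is None or count > most_count'  (resp. '… or count < least_count')
def pvNoneOrGt (o : Option Int) (c : Int) : Bool := match o with | none => true | some m => decide (m < c)
def pvNoneOrLt (o : Option Int) (c : Int) : Bool := match o with | none => true | some m => decide (c < m)

def most_and_least_common_type (treats : List (List (String × String))) : Option String × Option String :=
  -- types[treat['type']] = types.get(treat['type'], 0) + 1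
  let types : PySem.Dict String Int :=
    treats.foldl (fun d t => d.insert (pvType t) (d.getD (pvType t) 0 + 1)) PySem.Dict.empty
  -- for ttype, count in types.items(): update (most_count, most_type) and (least_count, least_type)
  let r :=
    types.items.foldl
      (fun (s : (Option Int × Option String) × (Option Int × Option String)) kv =>
        (if pvNoneOrGt s.1.1 kv.2 then (some kv.2, some kv.1) else s.1,
         if pvNoneOrLt s.2.1 kv.2 then (some kv.2, some kv.1) else s.2))
      ((none, none), (none, none))
  (r.1.2, r.2.2)

-- ===== PORT B =====
def most_and_least_common_type_alt (treats : List (List (String × String))) : Option String × Option String :=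
  let kinds := treats.map pvType
  if kinds = [] then (none, none)
  else
    -- distinct = list(dict.fromkeys(kinds))
    let distinct := PySem.List.dedup kinds
    -- top    = sorted(distinct, key=kinds.count, reverse=True)
    -- ranked = sorted(distinct, key=kinds.count)
    let top := PySem.List.sorted distinct (fun k => (kinds.count k : Int)) true
    let ranked := PySem.List.sorted distinct (fun k => (kinds.count k : Int)) false
    (top.head?, ranked.head?)

-- ===== PRECONDITION & SPEC =====
-- Pre_: every treat carries the key 'type'; on any other treat Python A (and B) raises KeyError.
def Pre_most_and_least_common_type (treats : List (List (String × String))) : Prop :=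
  ∀ t ∈ treats, "type" ∈ t.map (·.1)
instance (treats : List (List (String × String))) : Decidable (Pre_most_and_least_common_type treats) := by unfold Pre_most_and_least_common_type; infer_instance

def pvWitness_most_and_least_common_type : (List (List (String × String))) :=
  [[("type", "dessert")], [("type", "drink")], [("type", "dessert")]]

def Spec_most_and_least_common_type (treats : List (List (String × String))) (out : Option String × Option String) : Prop := out = most_and_least_common_type_alt treats
instance (treats : List (List (String × String))) (out : Option String × Option String) : Decidable (Spec_most_and_least_common_type treats out) := by unfold Spec_most_and_least_common_type; infer_instance

-- ===== CLAIM (what is proved, stated in full; the proofs are below) =====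
def Claim_equal_most_and_least_common_type : Prop := ∀ (treats : List (List (String × String))), Dom_most_and_least_common_type treats → Pre_most_and_least_common_type treats → Spec_most_and_least_common_type treats (most_and_least_common_type treats)

-- ===== LEMMAS AND PROOFS =====

-- step function of PySem.List.max? / min? with key (·.2), named for the inductions below
def pvMaxStep (o : Option (String × Int)) (kv : String × Int) : Option (String × Int) :=
  match o with | none => some kv | some m => if m.2 < kv.2 then some kv else some m
def pvMinStep (o : Option (String × Int)) (kv : String × Int) : Option (String × Int) :=
  match o with | none => some kv | some m => if kv.2 < m.2 then some kv else some m

-- A's 'most' accumulator pair tracks exactly (value, key) of the running first strict maximum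
lemma foldA_max (l : List (String × Int)) (o : Option (String × Int)) :
    l.foldl (fun (s : Option Int × Option String) kv =>
        if pvNoneOrGt s.1 kv.2 then (some kv.2, some kv.1) else s)
      (o.map (·.2), o.map (·.1))
    = ((l.foldl pvMaxStep o).map (·.2), (l.foldl pvMaxStep o).map (·.1)) := by
  induction l generalizing o with
  | nil => rfl
  | cons kv t ih =>
    have hstep :
        (if pvNoneOrGt (o.map (·.2)) kv.2 then (some kv.2, some kv.1)
         else (o.map (·.2), o.map (·.1)))
        = (((pvMaxStep o kv).map (·.2)), ((pvMaxStep o kv).map (·.1))) := by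
      cases o with
      | none => rfl
      | some m =>
        simp only [pvNoneOrGt, pvMaxStep, Option.map_some]
        by_cases h : m.2 < kv.2 <;> simp [h]
    simp only [List.foldl_cons, hstep, ih]

lemma foldA_min (l : List (String × Int)) (o : Option (String × Int)) :
    l.foldl (fun (s : Option Int × Option String) kv =>
        if pvNoneOrLt s.1 kv.2 then (some kv.2, some kv.1) else s)
      (o.map (·.2), o.map (·.1))
    = ((l.foldl pvMinStep o).map (·.2), (l.foldl pvMinStep o).map (·.1)) := by
  induction l generalizing o with
  | nil => rfl
  | cons kv t ih =>
    have hstep :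
        (if pvNoneOrLt (o.map (·.2)) kv.2 then (some kv.2, some kv.1)
         else (o.map (·.2), o.map (·.1)))
        = (((pvMinStep o kv).map (·.2)), ((pvMinStep o kv).map (·.1))) := by
      cases o with
      | none => rfl
      | some m =>
        simp only [pvNoneOrLt, pvMinStep, Option.map_some]
        by_cases h : kv.2 < m.2 <;> simp [h]
    simp only [List.foldl_cons, hstep, ih]

-- A-side and B-side extremal steps written as foldls of PySem.List.max?/min?
def pvMaxStepK {α : Type} (key : α → Int) (o : Option α) (x : α) : Option α :=
  match o with | none => some x | some m => if key m < key x then some x else some m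
def pvMinStepK {α : Type} (key : α → Int) (o : Option α) (x : α) : Option α :=
  match o with | none => some x | some m => if key x < key m then some x else some m

lemma max?_eq_foldl {α : Type} (l : List α) (key : α → Int) :
    PySem.List.max? l key = l.foldl (pvMaxStepK key) none := rfl

lemma min?_eq_foldl {α : Type} (l : List α) (key : α → Int) :
    PySem.List.min? l key = l.foldl (pvMinStepK key) none := rfl

-- specializations of the fold lemmas used by the main proof
lemma foldA_max_none (l : List (String × Int)) :
    l.foldl (fun (s : Option Int × Option String) kv =>
        if pvNoneOrGt s.1 kv.2 then (some kv.2, some kv.1) else s) (none, none)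
    = ((PySem.List.max? l (·.2)).map (·.2), (PySem.List.max? l (·.2)).map (·.1)) := by
  have h := foldA_max l none
  have he : List.foldl pvMaxStep none l = l.foldl (pvMaxStepK (·.2)) none := by
    congr 1
    funext o kv
    cases o <;> rfl
  rw [max?_eq_foldl, ← he]
  exact h

lemma foldA_min_none (l : List (String × Int)) :
    l.foldl (fun (s : Option Int × Option String) kv =>
        if pvNoneOrLt s.1 kv.2 then (some kv.2, some kv.1) else s) (none, none)
    = ((PySem.List.min? l (·.2)).map (·.2), (PySem.List.min? l (·.2)).map (·.1)) := by
  have h := foldA_min l none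
  have he : List.foldl pvMinStep none l = l.foldl (pvMinStepK (·.2)) none := by
    congr 1
    funext o kv
    cases o <;> rfl
  rw [min?_eq_foldl, ← he]
  exact h

-- head of a stable insertion: the first element wins ties
lemma head?_insertBy {α : Type} (before : α → α → Bool) (x : α) (l : List α) :
    (PySem.List.insertBy before x l).head?
      = some (match l.head? with | none => x | some h => if before x h then x else h) := by
  cases l with
  | nil => rfl
  | cons h t =>
    simp only [PySem.List.insertBy, List.head?_cons]
    by_cases hb : before x h <;> simp [hb]

-- head of the insertion-sort fold is the running first extremal element
lemma head?_foldl_insertBy {α : Type} (before : α → α → Bool) (xs : List α) (acc : List α) :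
    (xs.foldl (fun acc x => PySem.List.insertBy before x acc) acc).head?
      = xs.foldl (fun o x => match o with
          | none => some x
          | some h => if before x h then some x else some h) acc.head? := by
  induction xs generalizing acc with
  | nil => rfl
  | cons x t ih =>
    simp only [List.foldl_cons, ih, head?_insertBy]
    cases acc.head? with
    | none => rfl
    | some h => by_cases hb : before x h <;> simp [hb]

-- first element of the ascending stable sort = Python min(…, key=…) (first minimal)
lemma head?_sorted_eq_min? {α : Type} (xs : List α) (key : α → Int) :
    (PySem.List.sorted xs key false).head? = PySem.List.min? xs key := by
  rw [PySem.List.sorted_eq_foldl_insertBy, head?_foldl_insertBy, min?_eq_foldl]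
  simp only [List.head?_nil]
  congr 1
  funext o x
  cases o <;> simp [pvMinStepK]

-- first element of the descending stable sort = Python max(…, key=…) (first maximal)
lemma head?_sorted_rev_eq_max? {α : Type} (xs : List α) (key : α → Int) :
    (PySem.List.sorted xs key true).head? = PySem.List.max? xs key := by
  rw [PySem.List.sorted_rev_eq_foldl_insertBy, head?_foldl_insertBy, max?_eq_foldl]
  simp only [List.head?_nil]
  congr 1
  funext o x
  cases o <;> simp [pvMaxStepK]

-- max?/min? of the (key, count) pairs project to max?/min? of the keys under the count key
lemma foldl_maxStepK_map (ks : List String) (f : String → Int) (o : Option String) :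
    (ks.map (fun k => (k, f k))).foldl (pvMaxStepK (·.2)) (o.map (fun k => (k, f k)))
    = (ks.foldl (pvMaxStepK f) o).map (fun k => (k, f k)) := by
  induction ks generalizing o with
  | nil => rfl
  | cons k t ih =>
    have hstep : pvMaxStepK (·.2) (o.map (fun k => (k, f k))) (k, f k)
        = (pvMaxStepK f o k).map (fun k => (k, f k)) := by
      cases o with
      | none => rfl
      | some m => simp only [pvMaxStepK, Option.map_some]; by_cases h : f m < f k <;> simp [h]
    simp only [List.map_cons, List.foldl_cons, hstep, ih]

lemma foldl_minStepK_map (ks : List String) (f : String → Int) (o : Option String) :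
    (ks.map (fun k => (k, f k))).foldl (pvMinStepK (·.2)) (o.map (fun k => (k, f k)))
    = (ks.foldl (pvMinStepK f) o).map (fun k => (k, f k)) := by
  induction ks generalizing o with
  | nil => rfl
  | cons k t ih =>
    have hstep : pvMinStepK (·.2) (o.map (fun k => (k, f k))) (k, f k)
        = (pvMinStepK f o k).map (fun k => (k, f k)) := by
      cases o with
      | none => rfl
      | some m => simp only [pvMinStepK, Option.map_some]; by_cases h : f k < f m <;> simp [h]
    simp only [List.map_cons, List.foldl_cons, hstep, ih]

lemma max?_pairs (ks : List String) (f : String → Int) :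
    (PySem.List.max? (ks.map (fun k => (k, f k))) (·.2)).map (·.1)
    = PySem.List.max? ks f := by
  rw [max?_eq_foldl, max?_eq_foldl]
  have h := foldl_maxStepK_map ks f none
  simp only [Option.map_none] at h
  rw [h, Option.map_map]
  have hcomp : ((fun (x : String × Int) => x.1) ∘ (fun k => (k, f k))) = id := rfl
  rw [hcomp, Option.map_id, id_eq]

lemma min?_pairs (ks : List String) (f : String → Int) :
    (PySem.List.min? (ks.map (fun k => (k, f k))) (·.2)).map (·.1)
    = PySem.List.min? ks f := by
  rw [min?_eq_foldl, min?_eq_foldl]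
  have h := foldl_minStepK_map ks f none
  simp only [Option.map_none] at h
  rw [h, Option.map_map]
  have hcomp : ((fun (x : String × Int) => x.1) ∘ (fun k => (k, f k))) = id := rfl
  rw [hcomp, Option.map_id, id_eq]

-- ===== VERDICT (by name: the statement is the Claim_ definition above) =====
theorem most_and_least_common_type_spec : Claim_equal_most_and_least_common_type := by
  intro treats _ _
  unfold Spec_most_and_least_common_type
  unfold most_and_least_common_type most_and_least_common_type_alt
  dsimp only
  set kinds := treats.map pvType with hkinds
  by_cases hnil : kinds = []
  · have ht : treats = [] := by
      cases treats with
      | nil => rfl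
      | cons a t => simp [hkinds] at hnil
    subst ht
    rfl
  · -- A's counting loop is the counter of the extracted kinds
    have hA : treats.foldl (fun d t => d.insert (pvType t) (d.getD (pvType t) 0 + 1)) PySem.Dict.empty
        = PySem.Dict.counter kinds := by
      rw [hkinds, ← PySem.Dict.foldl_insert_getD_add_one_eq_counter, List.foldl_map]
    set f : String → Int := fun k => (List.count k kinds : Int) with hf
    have hitems : (PySem.Dict.counter kinds).items
        = (PySem.Set.ofList kinds).map (fun k => (k, f k)) := PySem.Dict.items_counter kinds
    rw [hA, if_neg hnil, hitems]
    rw [PySem.List.foldl_prod_mk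
      (f := fun (s : Option Int × Option String) (kv : String × Int) =>
        if pvNoneOrGt s.1 kv.2 then (some kv.2, some kv.1) else s)
      (g := fun (s : Option Int × Option String) (kv : String × Int) =>
        if pvNoneOrLt s.1 kv.2 then (some kv.2, some kv.1) else s)]
    rw [foldA_max_none, foldA_min_none]
    rw [max?_pairs, min?_pairs]
    rw [PySem.List.dedup_eq_ofList, head?_sorted_eq_min?, head?_sorted_rev_eq_max?]
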